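-- pv_equiv track=rewrite | github.com/AthharPro/zypher | python-scanner/zypher_scanner/db_ruls/cicd-vuln-005.py | _find_stage_job_line
-- ===== SOURCE A (Python) =====
-- from typing import List, Dict, Any
--
-- def _find_stage_job_line(file_lines: List[str], stage_idx: int, job_idx: int) -> int:
--     stage_marker_count = -1
--     job_marker_count = -1
--     for i, line in enumerate(file_lines):
--         if "stage:" in line or "- stage:" in line:
--             stage_marker_count += 1
--             if stage_marker_count == stage_idx:
--                 for j in range(i, len(file_lines)):
--                     if "job:" in file_lines[j] or "- job:" in file_lines[j]:
--                         job_marker_count += 1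
--                         if job_marker_count == job_idx:
--                             return j
--     return -1
-- ===== SOURCE B (Python) =====
-- def _find_stage_job_line(file_lines, stage_idx, job_idx):
--     stages = [i for i, line in enumerate(file_lines)
--               if "stage:" in line or "- stage:" in line]
--     if not (0 <= stage_idx < len(stages)):
--         return -1
--     start = stages[stage_idx]
--     jobs = [j for j, line in enumerate(file_lines)
--             if j >= start and ("job:" in line or "- job:" in line)]
--     if not (0 <= job_idx < len(jobs)):
--         return -1
--     return jobs[job_idx]
-- ===== Notes on version B (the rewrite author's own statement) =====
-- stated objective: simpler
-- what changed: Replaces the nested counter-driven scan (a job scan restarted inside the stage scan with counters threaded across iterations) by two flat comprehensions that collect all stage-line and job-line indices once and then index into them after a bounds check.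
import Mathlib
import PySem

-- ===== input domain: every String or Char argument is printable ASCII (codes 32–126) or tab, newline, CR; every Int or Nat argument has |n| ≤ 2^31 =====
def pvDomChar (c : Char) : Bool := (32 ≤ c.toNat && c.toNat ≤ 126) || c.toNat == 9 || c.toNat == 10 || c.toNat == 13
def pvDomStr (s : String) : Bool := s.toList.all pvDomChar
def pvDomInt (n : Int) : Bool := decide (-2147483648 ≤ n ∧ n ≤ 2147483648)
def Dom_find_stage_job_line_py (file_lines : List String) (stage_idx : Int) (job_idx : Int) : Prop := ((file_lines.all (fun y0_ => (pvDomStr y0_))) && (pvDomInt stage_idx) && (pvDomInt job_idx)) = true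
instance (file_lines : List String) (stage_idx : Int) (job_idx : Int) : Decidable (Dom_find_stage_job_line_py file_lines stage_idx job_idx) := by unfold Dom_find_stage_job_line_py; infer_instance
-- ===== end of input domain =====

-- B replaces A's nested counter-driven scan by two flat filtered index lists that are
-- bounds-checked and indexed directly; same O(n) cost, simpler decomposition.


-- ===== PORT A =====
-- '"stage:" in line or "- stage:" in line'
def pvIsStage (line : String) : Bool :=
  PySem.Str.isIn "stage:" line || PySem.Str.isIn "- stage:" line

-- '"job:" in l or "- job:" in l'
def pvIsJob (line : String) : Bool :=
  PySem.Str.isIn "job:" line || PySem.Str.isIn "- job:" line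

-- inner loop 'for j in range(i, len(file_lines)): …', threading job_marker_count and
-- returning (final job_marker_count, returned index if any); every j the loop visits is
-- in range, so pyGetD is exact for 'file_lines[j]'
def pvInnerA (fl : List String) (ji : Int) : List Int → Int → Int × Option Int
  | [], jmc => (jmc, none)
  | j :: rest, jmc =>
    if pvIsJob (PySem.List.pyGetD fl j "") then
      if jmc + 1 = ji then (jmc + 1, some j)
      else pvInnerA fl ji rest (jmc + 1)
    else pvInnerA fl ji rest jmc

-- outer loop 'for i, line in enumerate(file_lines): …' with both counters threaded
def pvOuterA (fl : List String) (si ji : Int) : List (Int × String) → Int → Int → Int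
  | [], _, _ => -1
  | (i, line) :: rest, smc, jmc =>
    if pvIsStage line then
      if smc + 1 = si then
        match pvInnerA fl ji (PySem.List.pyRange i (fl.length : Int) 1) jmc with
        | (_, some j) => j
        | (jmc', none) => pvOuterA fl si ji rest (smc + 1) jmc'
      else pvOuterA fl si ji rest (smc + 1) jmc
    else pvOuterA fl si ji rest smc jmc

def find_stage_job_line_py (file_lines : List String) (stage_idx : Int) (job_idx : Int) : Int :=
  pvOuterA file_lines stage_idx job_idx (PySem.List.enumerate file_lines 0) (-1) (-1)

-- ===== PORT B =====
def find_stage_job_line_py_alt (file_lines : List String) (stage_idx : Int) (job_idx : Int) : Int :=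
  let stages := ((PySem.List.enumerate file_lines 0).filter (fun p => pvIsStage p.2)).map Prod.fst
  if 0 ≤ stage_idx ∧ stage_idx < (stages.length : Int) then
    let start := PySem.List.pyGetD stages stage_idx 0   -- in range by the guard
    let jobs := ((PySem.List.enumerate file_lines 0).filter
        (fun p => decide (start ≤ p.1) && pvIsJob p.2)).map Prod.fst
    if 0 ≤ job_idx ∧ job_idx < (jobs.length : Int) then PySem.List.pyGetD jobs job_idx 0
    else -1
  else -1

-- ===== PRECONDITION & SPEC =====
def Spec_find_stage_job_line_py (file_lines : List String) (stage_idx : Int) (job_idx : Int) (out : Int) : Prop := out = find_stage_job_line_py_alt file_lines stage_idx job_idx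
instance (file_lines : List String) (stage_idx : Int) (job_idx : Int) (out : Int) : Decidable (Spec_find_stage_job_line_py file_lines stage_idx job_idx out) := by unfold Spec_find_stage_job_line_py; infer_instance

-- ===== CLAIM (what is proved, stated in full; the proofs are below) =====
def Claim_equal_find_stage_job_line_py : Prop := ∀ (file_lines : List String) (stage_idx : Int) (job_idx : Int), Dom_find_stage_job_line_py file_lines stage_idx job_idx → Spec_find_stage_job_line_py file_lines stage_idx job_idx (find_stage_job_line_py file_lines stage_idx job_idx)

-- ===== LEMMAS AND PROOFS =====

-- the inner loop returns the (ji - jmc - 1)-th job-line index among the visited indices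
lemma pvInnerA_spec (fl : List String) (ji : Int) :
    ∀ (js : List Int) (jmc : Int),
      (pvInnerA fl ji js jmc).2 =
        if jmc < ji ∧ ji - jmc - 1 < ((js.filter (fun j => pvIsJob (PySem.List.pyGetD fl j ""))).length : Int) then
          some ((js.filter (fun j => pvIsJob (PySem.List.pyGetD fl j ""))).getD (ji - jmc - 1).toNat 0)
        else none := by
  intro js
  induction js with
  | nil =>
    intro jmc
    simp only [pvInnerA, List.filter_nil, List.length_nil]
    rw [if_neg (by omega)]
  | cons j rest IH =>
    intro jmc
    cases hj : pvIsJob (PySem.List.pyGetD fl j "") with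
    | true =>
      have hfil : List.filter (fun x => pvIsJob (PySem.List.pyGetD fl x "")) (j :: rest)
          = j :: List.filter (fun x => pvIsJob (PySem.List.pyGetD fl x "")) rest := by
        simp [hj]
      by_cases he : jmc + 1 = ji
      · simp only [pvInnerA, hj, he, if_true, hfil]
        rw [if_pos (by constructor <;> [omega; (simp only [List.length_cons]; push_cast; omega)])]
        have h0 : (ji - jmc - 1).toNat = 0 := by omega
        rw [h0, List.getD_cons_zero]
      · simp only [pvInnerA, hj, if_true, if_neg he, hfil]
        rw [IH]
        by_cases h1 : jmc + 1 < ji ∧ ji - (jmc + 1) - 1 < ((rest.filter (fun x => pvIsJob (PySem.List.pyGetD fl x ""))).length : Int)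
        · rw [if_pos h1, if_pos (by obtain ⟨h1a, h1b⟩ := h1; constructor <;> [omega; (simp only [List.length_cons]; push_cast; omega)])]
          have hk : (ji - jmc - 1).toNat = (ji - (jmc + 1) - 1).toNat + 1 := by omega
          rw [hk, List.getD_cons_succ]
        · rw [if_neg h1, if_neg (by simp only [List.length_cons] at *; push_cast at h1 ⊢; omega)]
    | false =>
      have hfil : List.filter (fun x => pvIsJob (PySem.List.pyGetD fl x "")) (j :: rest)
          = List.filter (fun x => pvIsJob (PySem.List.pyGetD fl x "")) rest := by
        simp [hj]
      simp only [pvInnerA, hj, Bool.false_eq_true, if_false, hfil]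
      exact IH jmc

-- the outer loop runs the inner scan from the (si - smc - 1)-th stage-line index, once
lemma pvOuterA_spec (fl : List String) (si ji : Int) :
    ∀ (xs : List (Int × String)) (smc jmc : Int),
      pvOuterA fl si ji xs smc jmc =
        if smc < si ∧ si - smc - 1 < (((xs.filter (fun p => pvIsStage p.2)).map Prod.fst).length : Int) then
          match (pvInnerA fl ji
              (PySem.List.pyRange (((xs.filter (fun p => pvIsStage p.2)).map Prod.fst).getD (si - smc - 1).toNat 0)
                (fl.length : Int) 1) jmc).2 with
          | some j => j
          | none => -1
        else -1 := by
  intro xs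
  induction xs with
  | nil =>
    intro smc jmc
    simp only [pvOuterA, List.filter_nil, List.map_nil, List.length_nil]
    rw [if_neg (by omega)]
  | cons p rest IH =>
    obtain ⟨i, line⟩ := p
    intro smc jmc
    cases hs : pvIsStage line with
    | true =>
      have hfil : (List.filter (fun p => pvIsStage p.2) ((i, line) :: rest)).map Prod.fst
          = i :: (List.filter (fun p => pvIsStage p.2) rest).map Prod.fst := by
        simp [hs]
      by_cases he : smc + 1 = si
      · rcases hres : pvInnerA fl ji (PySem.List.pyRange i (fl.length : Int) 1) jmc with ⟨jmc', r⟩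
        have h0 : (si - smc - 1).toNat = 0 := by omega
        simp only [pvOuterA, hs, he, if_true, hfil, h0, List.getD_cons_zero, hres]
        rw [if_pos (by constructor <;> [omega; (simp only [List.length_cons]; push_cast; omega)])]
        cases r with
        | some j => rfl
        | none =>
          dsimp only
          rw [IH, if_neg (by omega)]
      · simp only [pvOuterA, hs, if_true, if_neg he, hfil]
        rw [IH]
        by_cases h1 : smc + 1 < si ∧ si - (smc + 1) - 1 < (((rest.filter (fun p => pvIsStage p.2)).map Prod.fst).length : Int)
        · rw [if_pos h1, if_pos (by obtain ⟨h1a, h1b⟩ := h1; constructor <;> [omega; (simp only [List.length_cons]; push_cast; omega)])]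
          have hk : (si - smc - 1).toNat = (si - (smc + 1) - 1).toNat + 1 := by omega
          rw [hk, List.getD_cons_succ]
        · rw [if_neg h1, if_neg (by simp only [List.length_cons] at *; push_cast at h1 ⊢; omega)]
    | false =>
      have hfil : (List.filter (fun p => pvIsStage p.2) ((i, line) :: rest)).map Prod.fst
          = (List.filter (fun p => pvIsStage p.2) rest).map Prod.fst := by
        simp [hs]
      simp only [pvOuterA, hs, Bool.false_eq_true, if_false, hfil]
      exact IH smc jmc

-- xs[m] for a cons and a positive Int index
lemma pvGetD_cons_pos (x : String) (xs : List String) (m : Int) (hm : 1 ≤ m) :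
    PySem.List.pyGetD (x :: xs) m "" = PySem.List.pyGetD xs (m - 1) "" := by
  obtain ⟨k, hk⟩ : ∃ k : Nat, m = (k : Int) + 1 := ⟨(m - 1).toNat, by omega⟩
  subst hk
  have h1 : ((k : Int) + 1) = ((k + 1 : Nat) : Int) := by push_cast; ring
  have h2 : ((k : Int) + 1 - 1) = (k : Int) := by ring
  rw [h2, h1, PySem.List.pyGetD_natCast, PySem.List.pyGetD_natCast, List.getD_cons_succ]

-- a comprehension over enumerate = a comprehension over the index range
lemma pvEnumFilter (P : Int → String → Bool) :
    ∀ (fl : List String) (s0 : Int),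
      ((PySem.List.enumerate fl s0).filter (fun p => P p.1 p.2)).map Prod.fst
        = (PySem.List.pyRange s0 (s0 + (fl.length : Int)) 1).filter
            (fun j => P j (PySem.List.pyGetD fl (j - s0) "")) := by
  intro fl
  induction fl with
  | nil =>
    intro s0
    simp [PySem.List.enumerate_nil]
  | cons x xs IH =>
    intro s0
    rw [PySem.List.enumerate_cons,
      PySem.List.pyRange_one_cons (by simp only [List.length_cons]; push_cast; omega)]
    simp only [List.filter_cons, List.length_cons]
    have hhead : (P s0 (PySem.List.pyGetD (x :: xs) (s0 - s0) "")) = P s0 x := by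
      rw [show s0 - s0 = ((0:Nat):Int) by omega, PySem.List.pyGetD_natCast, List.getD_cons_zero]
    have htail : (PySem.List.pyRange (s0 + 1) (s0 + ((xs.length + 1 : Nat) : Int)) 1).filter
          (fun j => P j (PySem.List.pyGetD (x :: xs) (j - s0) ""))
        = ((PySem.List.enumerate xs (s0 + 1)).filter (fun p => P p.1 p.2)).map Prod.fst := by
      rw [show s0 + ((xs.length + 1 : Nat) : Int) = (s0 + 1) + (xs.length : Int) by push_cast; ring,
        IH (s0 + 1)]
      apply List.filter_congr
      intro j hj
      have hmem := PySem.List.mem_pyRange_one.mp hj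
      rw [pvGetD_cons_pos x xs (j - s0) (by omega),
        show j - s0 - 1 = j - (s0 + 1) by ring]
    cases hP : P s0 x with
    | true => simp only [hhead, hP, if_true, htail, List.map_cons]
    | false => simp only [hhead, hP, Bool.false_eq_true, if_false, htail]

-- dropping the range prefix below s = conjoining 's ≤ j' over the full range
lemma pvRangeSplit (L : Nat) (s : Int) (hs0 : 0 ≤ s) (hsL : s ≤ (L : Int)) (Q : Int → Bool) :
    (PySem.List.pyRange s (L : Int) 1).filter Q
      = (PySem.List.pyRange 0 (L : Int) 1).filter (fun j => decide (s ≤ j) && Q j) := by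
  rw [PySem.List.pyRange_one_append 0 s (L : Int) hs0 hsL, List.filter_append]
  have h1 : (PySem.List.pyRange 0 s 1).filter (fun j => decide (s ≤ j) && Q j) = [] := by
    apply List.filter_eq_nil_iff.mpr
    intro a ha
    have hm := PySem.List.mem_pyRange_one.mp ha
    simp only [Bool.and_eq_true, decide_eq_true_eq, not_and]
    intro hc
    omega
  have h2 : (PySem.List.pyRange s (L : Int) 1).filter (fun j => decide (s ≤ j) && Q j)
      = (PySem.List.pyRange s (L : Int) 1).filter Q := by
    apply List.filter_congr
    intro a ha
    have hm := PySem.List.mem_pyRange_one.mp ha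
    simp [hm.1]
  rw [h1, h2, List.nil_append]

-- ===== VERDICT (by name: the statement is the Claim_ definition above) =====
theorem find_stage_job_line_py_spec : Claim_equal_find_stage_job_line_py := by
  intro fl si ji _dom
  unfold Spec_find_stage_job_line_py find_stage_job_line_py find_stage_job_line_py_alt
  rw [pvOuterA_spec]
  set S := ((PySem.List.enumerate fl 0).filter (fun p => pvIsStage p.2)).map Prod.fst with hS
  by_cases hcond : 0 ≤ si ∧ si < (S.length : Int)
  · rw [if_pos (by omega), if_pos hcond]
    -- both sides pick the same start index s
    have hlt : si.toNat < S.length := by omega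
    have hstart : PySem.List.pyGetD S si 0 = S[si.toNat] :=
      PySem.List.pyGetD_eq_getElem S 0 hcond.1 hcond.2
    have hgetD : S.getD (si - -1 - 1).toNat 0 = S[si.toNat] := by
      rw [show (si - -1 - 1) = si by ring, List.getD_eq_getElem?_getD, List.getElem?_eq_getElem hlt,
        Option.getD_some]
    -- the start index is an index of fl
    have hsmem : S[si.toNat] ∈ S := List.getElem_mem hlt
    obtain ⟨p, hpmem, hpfst⟩ := List.mem_map.mp hsmem
    have hpin : p ∈ PySem.List.enumerate fl 0 := List.mem_of_mem_filter hpmem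
    have hfst : p.1 ∈ (PySem.List.enumerate fl 0).map Prod.fst := List.mem_map_of_mem hpin
    rw [PySem.List.map_fst_enumerate] at hfst
    have hsrange := PySem.List.mem_pyRange_one.mp hfst
    have hs0 : 0 ≤ S[si.toNat] := by rw [← hpfst]; exact hsrange.1
    have hsL : S[si.toNat] < (fl.length : Int) := by rw [← hpfst]; omega
    rw [hgetD, hstart, pvInnerA_spec]
    -- B's job list, rewritten into A's index world
    have hjobs : ((PySem.List.enumerate fl 0).filter
          (fun q => decide (S[si.toNat] ≤ q.1) && pvIsJob q.2)).map Prod.fst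
        = (PySem.List.pyRange S[si.toNat] (fl.length : Int) 1).filter
            (fun j => pvIsJob (PySem.List.pyGetD fl j "")) := by
      rw [pvEnumFilter (fun i l => decide (S[si.toNat] ≤ i) && pvIsJob l) fl 0]
      simp only [zero_add, sub_zero]
      rw [← pvRangeSplit (L := fl.length) (s := S[si.toNat]) hs0 (le_of_lt hsL)]
    rw [← hjobs]
    set J := ((PySem.List.enumerate fl 0).filter
        (fun q => decide (S[si.toNat] ≤ q.1) && pvIsJob q.2)).map Prod.fst with hJ
    by_cases hc2 : 0 ≤ ji ∧ ji < (J.length : Int)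
    · rw [if_pos (by omega), if_pos hc2]
      dsimp only
      have hlt2 : ji.toNat < J.length := by omega
      rw [show (ji - -1 - 1) = ji by ring,
        PySem.List.pyGetD_eq_getElem J 0 hc2.1 hc2.2,
        List.getD_eq_getElem?_getD, List.getElem?_eq_getElem hlt2, Option.getD_some]
    · rw [if_neg (by omega), if_neg hc2]
  · rw [if_neg (by omega), if_neg hcond]
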